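-- pv_equiv track=rewrite | github.com/KhelKim/PredictNerTag | module/preprocessing.py | get_ner_to_index_dic
-- ===== SOURCE A (Python) =====
-- def get_ner_to_index_dic(text):
--     ner_to_index_dic = {
--         'PAD': 0,
--     }
--     j = 1
--     for sentence in text:
--         for word, ner in sentence:
--             if ner not in ner_to_index_dic.keys():
--                 ner_to_index_dic[ner] = j
--                 j += 1
--     return ner_to_index_dic
-- ===== SOURCE B (Python) =====
-- def get_ner_to_index_dic(text):
--     # Different algorithm: no membership tests. A single reverse scan over the
--     # flattened tag stream records each tag's FIRST occurrence position (later
--     # writes are overwritten by earlier ones), then sorting the recorded tags by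
--     # that position recovers first-seen order; ranks are assigned from 1, 'PAD'
--     # keeping its reserved slot 0.
--     tags = [ner for sentence in text for word, ner in sentence]
--     first = {}
--     for i, tag in reversed(list(enumerate(tags))):
--         if tag != 'PAD':
--             first[tag] = i
--     order = sorted(first, key=first.get)
--     result = {'PAD': 0}
--     for rank, tag in enumerate(order, 1):
--         result[tag] = rank
--     return result
-- ===== Notes on version B (the rewrite author's own statement) =====
-- stated objective: alternative
-- what changed: A interleaves deduplication and index assignment in one nested loop with a membership test and a running counter; B never tests membership: it records each tag's first-occurrence position by overwriting in a single reverse scan of the flattened tag stream, sorts the tags by that position to recover first-seen order, and assigns ranks in a final enumerate pass.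
import Mathlib
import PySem

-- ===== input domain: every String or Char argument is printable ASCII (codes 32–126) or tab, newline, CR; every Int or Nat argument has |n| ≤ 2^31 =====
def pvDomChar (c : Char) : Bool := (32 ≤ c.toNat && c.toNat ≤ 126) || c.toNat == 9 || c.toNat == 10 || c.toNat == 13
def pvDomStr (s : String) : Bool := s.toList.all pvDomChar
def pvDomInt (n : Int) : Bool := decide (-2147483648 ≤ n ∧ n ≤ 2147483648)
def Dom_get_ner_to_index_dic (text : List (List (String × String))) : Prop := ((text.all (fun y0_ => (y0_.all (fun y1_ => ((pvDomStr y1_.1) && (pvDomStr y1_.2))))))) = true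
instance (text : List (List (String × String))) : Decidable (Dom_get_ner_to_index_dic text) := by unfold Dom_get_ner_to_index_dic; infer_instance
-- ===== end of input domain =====

-- B replaces A's membership-test loop by a reverse scan recording first-occurrence
-- positions plus a sort by position; same return value, proved equal.


-- ===== PORT A =====
-- literal port: dict {'PAD': 0}, counter j = 1, nested loop testing 'ner not in keys' before inserting
def get_ner_to_index_dic (text : List (List (String × String))) : List (String × Int) :=
  let st := text.foldl
    (fun (st : PySem.Dict String Int × Int) sentence =>
      sentence.foldl
        (fun (st : PySem.Dict String Int × Int) wn =>
          if st.1.contains wn.2 = false then (st.1.insert wn.2 st.2, st.2 + 1) else st)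
        st)
    (PySem.Dict.ofList [("PAD", 0)], 1)
  st.1.items

-- ===== PORT B =====
-- literal port of Source B: flatten the tags; reverse scan over enumerate(tags) overwriting
-- first[tag] = i (earlier writes win); sort the keys by recorded position
-- (first.get(t) is total on first's keys, ported as getD with a dummy default);
-- finally seed {'PAD': 0} and insert rank-from-1 for each tag of the sorted order.
def get_ner_to_index_dic_alt (text : List (List (String × String))) : List (String × Int) :=
  let tags := text.flatMap (fun sentence => sentence.map (fun wn => wn.2))
  let first := (PySem.List.enumerate tags).reverse.foldl
      (fun (d : PySem.Dict String Int) p => if p.2 ≠ "PAD" then d.insert p.2 p.1 else d)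
      PySem.Dict.empty
  let order := PySem.List.sorted first.keys (fun t => first.getD t 0) false
  let result := (PySem.List.enumerate order 1).foldl
      (fun (d : PySem.Dict String Int) p => d.insert p.2 p.1)
      (PySem.Dict.ofList [("PAD", 0)])
  result.items

-- ===== PRECONDITION & SPEC =====
def Spec_get_ner_to_index_dic (text : List (List (String × String))) (out : List (String × Int)) : Prop := out = get_ner_to_index_dic_alt text
instance (text : List (List (String × String))) (out : List (String × Int)) : Decidable (Spec_get_ner_to_index_dic text out) := by unfold Spec_get_ner_to_index_dic; infer_instance

-- ===== CLAIM (what is proved, stated in full; the proofs are below) =====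
def Claim_equal_get_ner_to_index_dic : Prop := ∀ (text : List (List (String × String))), Dom_get_ner_to_index_dic text → Spec_get_ner_to_index_dic text (get_ner_to_index_dic text)

-- ===== LEMMAS AND PROOFS =====

-- the dict A has built after having seen (in order, PAD excluded) the tags in `a`
def pvD (a : List String) : PySem.Dict String Int :=
  PySem.Dict.mk (("PAD", (0 : Int)) :: (a.zipIdx 1).map (fun p => (p.1, (p.2 : Int))))

-- A's loop restricted to the tag, as a step over the flat tag list
def pvStepA (st : PySem.Dict String Int × Int) (n : String) : PySem.Dict String Int × Int :=
  if st.1.contains n = false then (st.1.insert n st.2, st.2 + 1) else st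

-- the seen-tags accumulator A's membership test corresponds to
def pvSeen (a : List String) (n : String) : List String :=
  if (n == "PAD") || a.contains n then a else a ++ [n]

theorem pvMapFstZipIdx' (a : List String) (k : Nat) :
    List.map ((fun x : String × Int => x.1) ∘ fun p : String × Nat => (p.1, (p.2 : Int)))
      (a.zipIdx k) = a := by
  induction a generalizing k with
  | nil => rfl
  | cons x xs ih => simp only [List.zipIdx_cons, List.map_cons, Function.comp_apply, ih]

theorem pvContainsD (a : List String) (n : String) :
    (pvD a).contains n = ((n == "PAD") || a.contains n) := by
  rw [PySem.Dict.contains_eq_decide_mem_keys]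
  simp only [pvD, PySem.Dict.keys_mk, List.map_cons, List.map_map]
  rw [pvMapFstZipIdx']
  by_cases hp : n = "PAD" <;> by_cases hm : n ∈ a <;>
    simp [hp, hm, List.mem_cons]

theorem pvFlatten (text : List (List (String × String))) (st : PySem.Dict String Int × Int) :
    text.foldl
      (fun (st : PySem.Dict String Int × Int) sentence =>
        sentence.foldl
          (fun (st : PySem.Dict String Int × Int) wn =>
            if st.1.contains wn.2 = false then (st.1.insert wn.2 st.2, st.2 + 1) else st)
          st)
      st
    = (text.flatMap (fun sentence => sentence.map (fun wn => wn.2))).foldl pvStepA st := by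
  induction text generalizing st with
  | nil => rfl
  | cons s rest ih =>
      simp only [List.foldl_cons, List.flatMap_cons, List.foldl_append, List.foldl_map, ih,
        pvStepA]

theorem pvInvariant (l : List String) (a : List String) :
    l.foldl pvStepA (pvD a, 1 + (a.length : Int))
      = (pvD (l.foldl pvSeen a), 1 + ((l.foldl pvSeen a).length : Int)) := by
  induction l generalizing a with
  | nil => rfl
  | cons n l ih =>
      simp only [List.foldl_cons]
      by_cases h : ((n == "PAD") || a.contains n) = true
      · have hc : (pvD a).contains n = true := by rw [pvContainsD]; exact h
        simp only [pvStepA, pvSeen, hc, h, if_pos, Bool.true_eq_false, if_false]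
        exact ih a
      · have hc : (pvD a).contains n = false := by
          rw [pvContainsD]; exact Bool.not_eq_true _ ▸ (by simpa using h)
        have hb : ((n == "PAD") || a.contains n) = false := by simpa using h
        simp only [pvStepA, pvSeen, hc, hb, Bool.false_eq_true, if_false]
        have hins : (pvD a).insert n (1 + (a.length : Int)) = pvD (a ++ [n]) := by
          apply PySem.Dict.ext
          rw [PySem.Dict.items_insert_of_not_contains _ _ hc]
          simp [pvD, List.zipIdx_append]
        rw [hins]
        have hlen : (1 : Int) + (a.length : Int) + 1 = 1 + ((a ++ [n]).length : Int) := by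
          simp
          ring
        rw [hlen]
        exact ih (a ++ [n])

theorem pvSeenChar (l : List String) (a : List String) (hp : "PAD" ∉ a) :
    l.foldl pvSeen a
      = PySem.Set.discard (PySem.Set.update ("PAD" :: a) l) "PAD" := by
  induction l generalizing a with
  | nil =>
      simp only [List.foldl_nil, PySem.Set.update]
      show a = PySem.Set.discard ("PAD" :: a) "PAD"
      have hfa : List.filter (fun y => !(y == "PAD")) a = a := by
        apply List.filter_eq_self.mpr
        intro x hx
        have hne : x ≠ "PAD" := fun he => hp (he ▸ hx)
        simp [hne]
      simp [PySem.Set.discard, hfa]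
  | cons n l ih =>
      rw [List.foldl_cons, PySem.Set.update_cons, PySem.Set.add_eq_ite]
      by_cases h : n ∈ ("PAD" :: a)
      · have hb : ((n == "PAD") || a.contains n) = true := by
          rcases List.mem_cons.mp h with h1 | h2
          · simp [h1]
          · simp [h2]
        simp only [pvSeen, hb, if_true, if_pos h]
        exact ih a hp
      · have hb : ((n == "PAD") || a.contains n) = false := by
          simp only [List.mem_cons, not_or] at h
          simp [h.1, h.2]
        simp only [pvSeen, hb, Bool.false_eq_true, if_false, if_neg h]
        have : ("PAD" :: a) ++ [n] = "PAD" :: (a ++ [n]) := by simp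
        rw [this]
        apply ih
        intro hmem
        rcases List.mem_append.mp hmem with h1 | h2
        · exact hp h1
        · simp only [List.mem_singleton] at h2
          simp only [List.mem_cons, not_or] at h
          exact h.1 h2.symm

-- discarding PAD from set("PAD"::tags-as-set-update) = discarding PAD from set(tags)
theorem pvDiscardBridge (tags : List String) :
    PySem.Set.discard (PySem.Set.update ["PAD"] tags) "PAD"
      = PySem.Set.discard (PySem.Set.ofList tags) "PAD" := by
  rw [PySem.Set.update_eq_append_filter]
  simp only [PySem.Set.discard]
  rw [List.filter_append]
  have h1 : List.filter (fun y => !(y == "PAD")) ["PAD"] = [] := by rfl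
  rw [h1, List.nil_append, List.filter_filter]
  apply List.filter_congr
  intro x _
  by_cases hx : x = "PAD" <;> simp [PySem.Set.contains, hx]

-- ===== B-side lemmas =====

-- lookup in a fold of overwriting inserts = the LAST matching pair of the list
theorem pvGetFoldIns (L : List (Int × String)) (d : PySem.Dict String Int) (k : String) :
    (L.foldl (fun d p => d.insert p.2 p.1) d).get? k
      = match L.reverse.find? (fun p => p.2 == k) with
        | some q => some q.1
        | none => d.get? k := by
  induction L generalizing d with
  | nil => rfl
  | cons p L ih =>
      rw [List.foldl_cons, ih, List.reverse_cons, List.find?_append]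
      cases hf : L.reverse.find? (fun p => p.2 == k) with
      | some q => rfl
      | none =>
          simp only [Option.none_or]
          by_cases hk : p.2 = k
          · subst hk; simp [List.find?, PySem.Dict.get?_insert_self]
          · have hb : (p.2 == k) = false := by simp [hk]
            simp [List.find?, hb, PySem.Dict.get?_insert_of_ne _ _ (Ne.symm hk)]

-- find? over enumerate locates the FIRST occurrence
theorem pvFindEnum (t : String) : ∀ (l : List String) (s : Int), t ∈ l →
    (PySem.List.enumerate l s).find? (fun p => p.2 == t)
      = some (s + (l.idxOf t : Nat), t)
  | [], _, h => by cases h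
  | x :: xs, s, h => by
      rw [PySem.List.enumerate_cons]
      by_cases hx : x = t
      · subst hx
        simp [List.find?, List.idxOf_cons_self]
      · have ht : t ∈ xs := by
          rcases List.mem_cons.mp h with h1 | h1
          · exact absurd h1.symm hx
          · exact h1
        have hbx : (x == t) = false := by simp [hx]
        rw [List.find?]
        simp only [hbx]
        rw [pvFindEnum t xs (s + 1) ht, List.idxOf_cons_ne _ hx]
        simp only [Option.some.injEq, Prod.mk.injEq, and_true]
        push_cast
        ring

-- the tags dropped by the filter never match a non-PAD tag
theorem pvFindFilter (l : List (Int × String)) (t : String) (ht : t ≠ "PAD") :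
    (l.filter (fun p => decide (p.2 ≠ "PAD"))).find? (fun p => p.2 == t)
      = l.find? (fun p => p.2 == t) := by
  induction l with
  | nil => rfl
  | cons p l ih =>
      by_cases hp : p.2 = "PAD"
      · have h1 : (decide (p.2 ≠ "PAD")) = false := by simp [hp]
        have h2 : (p.2 == t) = false := by simp [hp]; exact fun he => ht he.symm
        simp only [List.filter_cons, h1, Bool.false_eq_true, if_false, List.find?, h2, ih]
      · have h1 : (decide (p.2 ≠ "PAD")) = true := by simp [hp]
        simp only [List.filter_cons, h1, if_true, List.find?]
        cases hq : (p.2 == t) with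
        | true => rfl
        | false => exact ih

-- Set.ofList is pairwise strictly increasing in first-occurrence index
theorem pvPairwiseIdx (l : List String) :
    (PySem.Set.ofList l).Pairwise (fun a b => l.idxOf a < l.idxOf b) := by
  induction l using List.reverseRecOn with
  | nil => simp [PySem.Set.ofList]
  | append_singleton l x ih =>
      have hof : PySem.Set.ofList (l ++ [x]) = PySem.Set.add (PySem.Set.ofList l) x := by
        rw [PySem.Set.ofList_eq_foldl, PySem.Set.ofList_eq_foldl, List.foldl_append]
        rfl
      rw [hof, PySem.Set.add_eq_ite]
      have hsub : ∀ a ∈ PySem.Set.ofList l, a ∈ l := fun a ha =>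
        (PySem.Set.mem_ofList l a).mp ha
      by_cases hx : x ∈ PySem.Set.ofList l
      · rw [if_pos hx]
        refine List.Pairwise.imp_of_mem ?_ ih
        intro a b ha hb hab
        rw [List.idxOf_append_of_mem (hsub a ha), List.idxOf_append_of_mem (hsub b hb)]
        exact hab
      · rw [if_neg hx]
        rw [List.pairwise_append]
        refine ⟨List.Pairwise.imp_of_mem ?_ ih, List.pairwise_singleton _ _, ?_⟩
        · intro a b ha hb hab
          rw [List.idxOf_append_of_mem (hsub a ha), List.idxOf_append_of_mem (hsub b hb)]
          exact hab
        · intro a ha b hb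
          rw [List.mem_singleton] at hb
          rw [hb]
          have hxl : x ∉ l := fun h => hx ((PySem.Set.mem_ofList l x).mpr h)
          rw [List.idxOf_append_of_mem (hsub a ha), List.idxOf_append_of_notMem hxl]
          have hlt := List.idxOf_lt_length_of_mem (hsub a ha)
          simpa using hlt

-- enumerate-with-swap equals zipIdx-with-cast
theorem pvEnumSwap (l : List String) (s : Nat) :
    (PySem.List.enumerate l (s : Int)).map (fun p => (p.2, p.1))
      = (l.zipIdx s).map (fun p => (p.1, (p.2 : Int))) := by
  induction l generalizing s with
  | nil => rfl
  | cons x xs ih =>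
      rw [PySem.List.enumerate_cons, List.zipIdx_cons, List.map_cons, List.map_cons]
      congr 1
      have : ((s : Int) + 1) = ((s + 1 : Nat) : Int) := by push_cast; ring
      rw [this]
      exact ih (s + 1)

-- B computes (pvD U).items for U = the ordered distinct non-PAD tags
theorem pvAltItems (text : List (List (String × String))) :
    get_ner_to_index_dic_alt text
      = (pvD (PySem.Set.discard
          (PySem.Set.ofList (text.flatMap (fun sentence => sentence.map (fun wn => wn.2))))
          "PAD")).items := by
  set tags := text.flatMap (fun sentence => sentence.map (fun wn => wn.2)) with htags
  have hdef : get_ner_to_index_dic_alt text =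
      ((PySem.List.enumerate
          (PySem.List.sorted
            ((PySem.List.enumerate tags).reverse.foldl
              (fun (d : PySem.Dict String Int) p => if p.2 ≠ "PAD" then d.insert p.2 p.1 else d)
              PySem.Dict.empty).keys
            (fun t => ((PySem.List.enumerate tags).reverse.foldl
              (fun (d : PySem.Dict String Int) p => if p.2 ≠ "PAD" then d.insert p.2 p.1 else d)
              PySem.Dict.empty).getD t 0) false) 1).foldl
        (fun (d : PySem.Dict String Int) p => d.insert p.2 p.1)
        (PySem.Dict.ofList [("PAD", 0)])).items := rfl
  rw [hdef]
  set U := PySem.Set.discard (PySem.Set.ofList tags) "PAD" with hU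
  -- membership and nodup facts about U
  have hUmem : ∀ t, t ∈ U ↔ (t ∈ tags ∧ t ≠ "PAD") := by
    intro t
    rw [hU]
    simp [PySem.Set.mem_discard, PySem.Set.mem_ofList]
  have hUnodup : U.Nodup := PySem.Set.nodup_discard _ _ (PySem.Set.nodup_ofList _)
  -- the reverse-scan dict: rewrite the if-fold as a fold over the filtered list
  have hfold :
      (PySem.List.enumerate tags).reverse.foldl
        (fun (d : PySem.Dict String Int) p => if p.2 ≠ "PAD" then d.insert p.2 p.1 else d)
        PySem.Dict.empty
      = ((PySem.List.enumerate tags).filter (fun p => decide (p.2 ≠ "PAD"))).reverse.foldl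
          (fun (d : PySem.Dict String Int) p => d.insert p.2 p.1) PySem.Dict.empty := by
    rw [PySem.List.foldl_ite_eq_foldl_filter, List.filter_reverse]
  rw [hfold]
  set E := (PySem.List.enumerate tags).filter (fun p => decide (p.2 ≠ "PAD")) with hE
  set first := E.reverse.foldl
      (fun (d : PySem.Dict String Int) p => d.insert p.2 p.1) PySem.Dict.empty with hfirst
  -- lookups in `first` give the first-occurrence index
  have hget : ∀ t ∈ U, first.get? t = some ((tags.idxOf t : Nat) : Int) := by
    intro t ht
    have h1 := (hUmem t).mp ht
    rw [hfirst, pvGetFoldIns, List.reverse_reverse, hE,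
      pvFindFilter _ _ h1.2, pvFindEnum t tags 0 h1.1]
    simp
  -- keys of `first` are a permutation of U
  have hkeys : first.keys = PySem.Set.ofList (E.reverse.map (fun p => p.2)) := by
    rw [hfirst]
    rw [PySem.Dict.keys_foldl_insert_key (key := fun p : Int × String => p.2)
      (f := fun _ p => p.1)]
    rfl
  have hkeysmem : ∀ t, t ∈ first.keys ↔ (t ∈ tags ∧ t ≠ "PAD") := by
    intro t
    rw [hkeys, PySem.Set.mem_ofList, hE]
    simp only [List.mem_map, List.mem_reverse, List.mem_filter, decide_eq_true_eq]
    constructor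
    · rintro ⟨p, ⟨hp, hne⟩, rfl⟩
      refine ⟨?_, hne⟩
      have := List.mem_map_of_mem (f := fun p : Int × String => p.2) hp
      rwa [PySem.List.map_snd_enumerate] at this
    · rintro ⟨hmem, hne⟩
      have hm2 : t ∈ (PySem.List.enumerate tags 0).map (fun p : Int × String => p.2) := by
        rw [PySem.List.map_snd_enumerate]; exact hmem
      rcases List.mem_map.mp hm2 with ⟨p, hp, hpt⟩
      exact ⟨p, ⟨hp, hpt ▸ hne⟩, hpt⟩
  have hkeysnodup : first.keys.Nodup := by
    rw [hkeys]; exact PySem.Set.nodup_ofList _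
  have hperm : U.Perm first.keys := by
    rw [List.perm_ext_iff_of_nodup hUnodup hkeysnodup]
    intro a
    rw [hUmem, hkeysmem]
  -- U is strictly increasing under the sort key
  have hpw : U.Pairwise (fun a b =>
      (fun t => first.getD t 0) a < (fun t => first.getD t 0) b) := by
    have hbase := pvPairwiseIdx tags
    have hfilter : U.Pairwise (fun a b => tags.idxOf a < tags.idxOf b) := by
      rw [hU]
      simp only [PySem.Set.discard]
      exact List.Pairwise.filter _ hbase
    refine List.Pairwise.imp_of_mem ?_ hfilter
    intro a b ha hb hab
    have hga := hget a ha
    have hgb := hget b hb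
    simp only [PySem.Dict.getD_eq_get?_getD, hga, hgb, Option.getD_some]
    exact_mod_cast hab
  -- hence the sort returns U itself
  have horder : PySem.List.sorted first.keys (fun t => first.getD t 0) false = U :=
    PySem.List.sorted_eq_of_perm_of_pairwise_lt _ _ _ hperm hpw
  rw [horder]
  -- the final loop inserts fresh distinct keys, so items append
  have hfresh : ∀ p ∈ PySem.List.enumerate U 1,
      (PySem.Dict.ofList [("PAD", (0 : Int))]).contains
        ((fun p : Int × String => p.2) p) = false := by
    intro p hp
    have hp2 : p.2 ∈ U := by
      have := List.mem_map_of_mem (f := fun p : Int × String => p.2) hp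
      rwa [PySem.List.map_snd_enumerate] at this
    have hne : p.2 ≠ "PAD" := ((hUmem p.2).mp hp2).2
    rw [PySem.Dict.contains_eq_decide_mem_keys]
    have hk : (PySem.Dict.ofList [("PAD", (0 : Int))]).keys = ["PAD"] := rfl
    rw [hk]
    simp [hne]
  have hnodup2 : ((PySem.List.enumerate U 1).map (fun p : Int × String => p.2)).Nodup := by
    rw [PySem.List.map_snd_enumerate]; exact hUnodup
  have happ := PySem.Dict.items_foldl_insert_fresh (l := PySem.List.enumerate U 1)
    (k := fun p : Int × String => p.2) (v := fun p : Int × String => p.1)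
    (d := PySem.Dict.ofList [("PAD", (0 : Int))]) hfresh hnodup2
  simp only at happ ⊢
  rw [happ]
  have h1 : ((1 : Int)) = ((1 : Nat) : Int) := rfl
  rw [h1, pvEnumSwap U 1]
  rfl

-- ===== VERDICT (by name: the statement is the Claim_ definition above) =====
theorem get_ner_to_index_dic_spec : Claim_equal_get_ner_to_index_dic := by
  intro text _
  unfold Spec_get_ner_to_index_dic
  rw [pvAltItems]
  unfold get_ner_to_index_dic
  rw [pvFlatten]
  have h0 : (PySem.Dict.ofList [("PAD", (0 : Int))], (1 : Int))
      = (pvD [], 1 + (([] : List String).length : Int)) := by rfl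
  rw [h0, pvInvariant]
  rw [pvSeenChar _ [] (by simp)]
  rw [pvDiscardBridge]
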